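-- pv_equiv track=rewrite | github.com/pomelyu/OmniSight | .agents/skills/package-sorter/scripts/sort_packages.py | sort_requirements_txt
-- ===== SOURCE A (Python) =====
-- def sort_requirements_txt(content: str) -> str:
--     """Sort requirements.txt style files."""
--     lines = content.splitlines(keepends=True)
--     result = []
--     package_block = []
--
--     for line in lines:
--         stripped = line.strip()
--
--         # Skip special pip directives and editable installs
--         if stripped.startswith(('-e ', '-r ', '--', '#')) or not stripped:
--             # Flush current package block if any
--             if package_block:
--                 result.extend(sorted(package_block, key=lambda x: x.lower()))
--                 package_block = []
--             result.append(line)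
--         else:
--             # Collect package lines
--             package_block.append(line)
--
--     # Flush remaining packages
--     if package_block:
--         result.extend(sorted(package_block, key=lambda x: x.lower()))
--
--     return ''.join(result)
-- ===== SOURCE B (Python) =====
-- def sort_requirements_txt(content: str) -> str:
--     """Sort requirements.txt style files (two-level index scan over runs)."""
--     def is_special(line: str) -> bool:
--         s = line.strip()
--         return s.startswith(('-e ', '-r ', '--', '#')) or not s
--
--     lines = content.splitlines(keepends=True)
--     out = []
--     i, n = 0, len(lines)
--     while i < n:
--         if is_special(lines[i]):
--             out.append(lines[i])
--             i += 1
--         else: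
--             j = i + 1
--             while j < n and not is_special(lines[j]):
--                 j += 1
--             out.extend(sorted(lines[i:j], key=lambda x: x.lower()))
--             i = j
--     return ''.join(out)
-- ===== Notes on version B (the rewrite author's own statement) =====
-- stated objective: alternative
-- what changed: Replaces A's single pass with a mutable package_block accumulator and flush-at-boundary logic by a two-level scan that finds each maximal run of non-special lines by index, sorts the run slice, and emits special lines directly.
import Mathlib
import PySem

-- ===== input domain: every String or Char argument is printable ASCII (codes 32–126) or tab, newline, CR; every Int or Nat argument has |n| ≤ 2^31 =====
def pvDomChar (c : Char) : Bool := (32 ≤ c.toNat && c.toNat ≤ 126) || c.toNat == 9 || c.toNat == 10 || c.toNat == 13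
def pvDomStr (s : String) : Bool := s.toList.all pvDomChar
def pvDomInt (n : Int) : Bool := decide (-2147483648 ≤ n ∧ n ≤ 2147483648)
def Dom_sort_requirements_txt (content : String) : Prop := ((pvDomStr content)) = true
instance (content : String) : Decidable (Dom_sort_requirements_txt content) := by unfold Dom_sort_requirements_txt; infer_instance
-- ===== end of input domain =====

-- B replaces A's mutable package_block accumulator and flush-at-boundary control flow by a
-- two-level scan that locates each maximal run of non-special lines and sorts it as a slice
-- (objective: alternative decomposition, same cost). Return values only; no argument is mutated.

-- content.splitlines(keepends=True), by hand (PySem.Str.splitlines drops the line endings);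
-- exact on the domain (only '\n', '\r', '\r\n' line breaks occur in printable-ASCII+tab/NL/CR input).
def pvSplitKeepAux : List Char → List Char → List (List Char)
  | [], acc => if acc.isEmpty then [] else [acc.reverse]
  | '\n' :: rest, acc => (acc.reverse ++ ['\n']) :: pvSplitKeepAux rest []
  | '\r' :: '\n' :: rest, acc => (acc.reverse ++ ['\r', '\n']) :: pvSplitKeepAux rest []
  | '\r' :: rest, acc => (acc.reverse ++ ['\r']) :: pvSplitKeepAux rest []
  | c :: rest, acc => pvSplitKeepAux rest (c :: acc)

def pvSplitlinesKeep (s : String) : List String :=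
  (pvSplitKeepAux s.toList []).map String.mk

-- stripped.startswith(('-e ', '-r ', '--', '#')) or not stripped  (identical text in A and B)
def pvIsSpecial (line : String) : Bool :=
  let stripped := PySem.Str.strip line
  PySem.Str.startswith stripped "-e " || PySem.Str.startswith stripped "-r " ||
    PySem.Str.startswith stripped "--" || PySem.Str.startswith stripped "#" ||
    stripped == ""

-- ===== PORT A =====
def sort_requirements_txt (content : String) : String :=
  let lines := pvSplitlinesKeep content
  let st := lines.foldl
    (fun (st : List String × List String) line =>
      if pvIsSpecial line then
        let result := if st.2.isEmpty then st.1
          else st.1 ++ PySem.List.sorted st.2 PySem.Str.lower false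
        (result ++ [line], [])
      else
        (st.1, st.2 ++ [line]))
    ([], [])
  let result := if st.2.isEmpty then st.1
    else st.1 ++ PySem.List.sorted st.2 PySem.Str.lower false
  PySem.Str.join "" result

-- ===== PORT B =====
-- the outer while-loop of Source B: emit a special line, or sort the maximal run lines[i:j]
def pvGoB : List String → List String
  | [] => []
  | l :: rest =>
    if pvIsSpecial l then l :: pvGoB rest
    else
      PySem.List.sorted (l :: rest.takeWhile (fun x => !pvIsSpecial x)) PySem.Str.lower false
        ++ pvGoB (rest.dropWhile (fun x => !pvIsSpecial x))
termination_by ls => ls.length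
decreasing_by
  · simp
  · have := List.length_dropWhile_le (fun x => !pvIsSpecial x) rest
    simp; omega

def sort_requirements_txt_alt (content : String) : String :=
  PySem.Str.join "" (pvGoB (pvSplitlinesKeep content))

-- ===== PRECONDITION & SPEC =====
def Spec_sort_requirements_txt (content : String) (out : String) : Prop := out = sort_requirements_txt_alt content
instance (content : String) (out : String) : Decidable (Spec_sort_requirements_txt content out) := by unfold Spec_sort_requirements_txt; infer_instance

-- ===== CLAIM (what is proved, stated in full; the proofs are below) =====
def Claim_equal_sort_requirements_txt : Prop := ∀ (content : String), Dom_sort_requirements_txt content → Spec_sort_requirements_txt content (sort_requirements_txt content)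

-- ===== LEMMAS AND PROOFS =====

-- the flushed form of a pending package block
def pvFlush (blk : List String) : List String :=
  if blk.isEmpty then [] else PySem.List.sorted blk PySem.Str.lower false

-- A's remaining computation as a function of (pending block, remaining lines)
def pvF : List String → List String → List String
  | blk, [] => pvFlush blk
  | blk, l :: ls =>
    if pvIsSpecial l then pvFlush blk ++ l :: pvF [] ls else pvF (blk ++ [l]) ls

def pvStep (st : List String × List String) (line : String) : List String × List String :=
  if pvIsSpecial line then
    ((if st.2.isEmpty then st.1
      else st.1 ++ PySem.List.sorted st.2 PySem.Str.lower false) ++ [line], [])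
  else
    (st.1, st.2 ++ [line])

def pvFin (st : List String × List String) : List String :=
  if st.2.isEmpty then st.1 else st.1 ++ PySem.List.sorted st.2 PySem.Str.lower false

def pvTail : List String → List String
  | [] => []
  | l :: r => l :: pvF [] r

theorem pvFoldA (ls : List String) : ∀ res blk,
    pvFin (ls.foldl pvStep (res, blk)) = res ++ pvF blk ls := by
  induction ls with
  | nil =>
    intro res blk
    simp only [List.foldl_nil, pvFin, pvF, pvFlush]
    split <;> simp
  | cons l ls ih =>
    intro res blk
    simp only [List.foldl_cons, pvF]
    by_cases h : pvIsSpecial l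
    · simp only [pvStep, h, if_pos]
      rw [ih]
      simp only [pvFlush]
      split <;> simp
    · simp only [pvStep, h, Bool.false_eq_true, if_neg, not_false_iff]
      rw [ih]

theorem pvDropWhile_head (p : String → Bool) :
    ∀ (xs : List String) (y : String) (ys : List String),
      xs.dropWhile p = y :: ys → p y = false := by
  intro xs
  induction xs with
  | nil => intro y ys h; simp [List.dropWhile] at h
  | cons x xs ih =>
    intro y ys h
    rw [List.dropWhile_cons] at h
    by_cases hx : p x
    · exact ih y ys (by simpa [hx] using h)
    · simp [hx] at h
      rw [← h.1]; simpa using hx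

theorem pvF_run (ls : List String) : ∀ blk,
    pvF blk ls =
      pvFlush (blk ++ ls.takeWhile (fun x => !pvIsSpecial x)) ++
        pvTail (ls.dropWhile (fun x => !pvIsSpecial x)) := by
  induction ls with
  | nil => intro blk; simp [pvF, pvTail]
  | cons l ls ih =>
    intro blk
    by_cases h : pvIsSpecial l
    · simp [pvF, h, pvTail]
    · simp only [pvF, h, Bool.false_eq_true, if_neg, not_false_iff,
        List.takeWhile_cons, List.dropWhile_cons, Bool.not_eq_true']
      rw [ih (blk ++ [l])]
      simp

theorem pvGoB_eq (ls : List String) : pvGoB ls = pvF [] ls := by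
  induction ls using pvGoB.induct with
  | case1 => rw [pvGoB]; simp [pvF, pvFlush]
  | case2 l rest h ih =>
    rw [pvGoB]
    simp [h, pvF, pvFlush, ih]
  | case3 l rest h ih =>
    rw [pvGoB]
    simp only [h, Bool.false_eq_true, if_neg, not_false_iff]
    have hF : pvF [] (l :: rest) = pvF [l] rest := by
      simp [pvF, h]
    rw [hF, pvF_run]
    have hflush : pvFlush ([l] ++ rest.takeWhile (fun x => !pvIsSpecial x)) =
        PySem.List.sorted (l :: rest.takeWhile (fun x => !pvIsSpecial x)) PySem.Str.lower false := by
      simp [pvFlush]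
    rw [hflush]
    congr 1
    rw [ih]
    rcases hd : rest.dropWhile (fun x => !pvIsSpecial x) with _ | ⟨l2, r⟩
    · simp [pvF, pvFlush, pvTail]
    · have hsp : pvIsSpecial l2 = true := by
        have := pvDropWhile_head (fun x => !pvIsSpecial x) rest l2 r hd
        simpa using this
      simp [pvF, hsp, pvFlush, pvTail]

-- ===== VERDICT (by name: the statement is the Claim_ definition above) =====
theorem sort_requirements_txt_spec : Claim_equal_sort_requirements_txt := by
  intro content _
  unfold Spec_sort_requirements_txt sort_requirements_txt sort_requirements_txt_alt
  show PySem.Str.join "" (pvFin ((pvSplitlinesKeep content).foldl pvStep ([], []))) = _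
  rw [pvFoldA, pvGoB_eq]
  simp
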